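-- pv_equiv track=rewrite | github.com/qtbodart/Work | Advent of Code 2023/Day 12/adventofcode12.py | check
-- ===== SOURCE A (Python) =====
-- def check(arrangement, numbers):
--     n_hashtags = 0
--     compare_numbers = []
--     for i in range(len(arrangement)):
--         if arrangement[i] == '#':
--             n_hashtags += 1
--         elif n_hashtags != 0:
--             compare_numbers.append(n_hashtags)
--             n_hashtags = 0
--         if i == len(arrangement)-1 and n_hashtags != 0:
--             compare_numbers.append(n_hashtags)
--     return compare_numbers == numbers
-- ===== SOURCE B (Python) =====
-- def check(arrangement, numbers):
--     groups = ''.join(c if c == '#' else ' ' for c in arrangement).split()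
--     return [len(g) for g in groups] == numbers
-- ===== Notes on version B (the rewrite author's own statement) =====
-- stated objective: idiomatic
-- what changed: Replaces the manual counter-and-flush state machine (with its elif separator branch and last-index flush) by masking every non-'#' character to a space and letting str.split() produce the '#'-groups, whose lengths are compared to numbers.
import Mathlib
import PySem

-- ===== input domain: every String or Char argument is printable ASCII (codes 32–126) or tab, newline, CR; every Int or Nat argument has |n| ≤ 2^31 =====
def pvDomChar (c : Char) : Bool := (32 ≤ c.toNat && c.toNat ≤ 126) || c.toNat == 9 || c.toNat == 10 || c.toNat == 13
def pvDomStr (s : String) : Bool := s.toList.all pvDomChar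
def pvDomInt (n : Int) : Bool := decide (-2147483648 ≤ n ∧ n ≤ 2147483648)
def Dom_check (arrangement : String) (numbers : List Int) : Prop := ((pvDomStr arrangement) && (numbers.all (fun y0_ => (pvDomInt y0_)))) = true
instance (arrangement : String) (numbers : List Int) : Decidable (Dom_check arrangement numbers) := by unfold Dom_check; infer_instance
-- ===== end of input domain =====

-- B replaces A's counter-and-flush index loop by masking non-'#' chars to spaces and
-- splitting on whitespace (idiomatic; same cost); return value only, no mutation.

-- ===== PORT A =====
-- A: for i in range(len(arrangement)): count '#'s, flush the counter on a separator,
-- and flush once more at the last index; finally compare to numbers.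
-- pvBody is A's loop body, extracted verbatim (state = (n_hashtags, compare_numbers)).
def pvBody (s : List Char) (N : Int) (st : Int × List Int) (i : Int) : Int × List Int :=
  let st1 :=
    if PySem.List.pyGetD s i ' ' = '#' then (st.1 + 1, st.2)
    else if st.1 ≠ 0 then ((0 : Int), st.2 ++ [st.1])
    else st
  if i = N - 1 ∧ st1.1 ≠ 0 then (st1.1, st1.2 ++ [st1.1]) else st1

def check (arrangement : String) (numbers : List Int) : Bool :=
  let s := arrangement.toList
  let st := (PySem.List.pyRange 0 (PySem.Str.len arrangement) 1).foldl
    (pvBody s (PySem.Str.len arrangement)) ((0 : Int), ([] : List Int))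
  decide (st.2 = numbers)

-- ===== PORT B =====
-- B: ''.join(c if c == '#' else ' ' for c in arrangement).split(), then compare lengths.
def check_alt (arrangement : String) (numbers : List Int) : Bool :=
  let masked := arrangement.toList.map (fun c => if c = '#' then c else ' ')
  let groups := PySem.Chars.split₀ masked
  decide (groups.map (fun g => (g.length : Int)) = numbers)

-- ===== PRECONDITION & SPEC =====
def Spec_check (arrangement : String) (numbers : List Int) (out : Bool) : Prop := out = check_alt arrangement numbers
instance (arrangement : String) (numbers : List Int) (out : Bool) : Decidable (Spec_check arrangement numbers out) := by unfold Spec_check; infer_instance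

-- ===== CLAIM (what is proved, stated in full; the proofs are below) =====
def Claim_equal_check : Prop := ∀ (arrangement : String) (numbers : List Int), Dom_check arrangement numbers → Spec_check arrangement numbers (check arrangement numbers)

-- ===== LEMMAS AND PROOFS =====

-- Reference run-length spec: pvExtend n cs = the '#'-run lengths of cs, with a run of
-- length n already open on the left.
def pvExtend : Nat → List Char → List Int
  | n, [] => if n = 0 then [] else [(n : Int)]
  | n, c :: t => if c = '#' then pvExtend (n + 1) t
                 else (if n = 0 then [] else [(n : Int)]) ++ pvExtend 0 t

-- B side: split₀.go on the masked chars yields exactly the runs of pvExtend.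
lemma pv_go_extend (cs : List Char) (cur : List Char) (acc : List (List Char)) :
    (PySem.Chars.split₀.go (cs.map (fun c => if c = '#' then c else ' ')) cur acc).map
        (fun g => (g.length : Int))
      = acc.reverse.map (fun g => (g.length : Int)) ++ pvExtend cur.length cs := by
  induction cs generalizing cur acc with
  | nil =>
      by_cases h : cur = []
      · simp [PySem.Chars.split₀.go, h, pvExtend]
      · simp [PySem.Chars.split₀.go, pvExtend, List.isEmpty_iff, List.length_eq_zero_iff, h]
  | cons c t ih =>
      by_cases hc : c = '#'
      · have : PySem.Chars.isspace '#' = false := by decide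
        simp [hc, PySem.Chars.split₀.go, this, ih, pvExtend]
      · have hsp : PySem.Chars.isspace ' ' = true := by decide
        by_cases h : cur = []
        · simp [hc, h, PySem.Chars.split₀.go, hsp, ih, pvExtend]
        · simp [hc, PySem.Chars.split₀.go, hsp, ih, pvExtend, List.isEmpty_iff,
            List.length_eq_zero_iff, h]

-- A side: the index loop from position k (k < length) ends with acc ++ pvExtend n (s.drop k).
lemma pv_loop_extend (s : List Char) (m : Nat) :
    ∀ (k : Nat), k + m = s.length → 0 < m → ∀ (n : Nat) (acc : List Int),
    ((PySem.List.pyRange (k : Int) (s.length : Int) 1).foldl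
        (pvBody s (s.length : Int)) ((n : Int), acc)).2
      = acc ++ pvExtend n (s.drop k) := by
  induction m with
  | zero => intro k hk hm; omega
  | succ m ih =>
      intro k hk hm n acc
      have hklt : k < s.length := by omega
      have hcons : PySem.List.pyRange (k : Int) (s.length : Int) 1
          = (k : Int) :: PySem.List.pyRange ((k : Int) + 1) (s.length : Int) 1 :=
        PySem.List.pyRange_one_cons (by exact_mod_cast hklt)
      have hdrop : s.drop k = s[k] :: s.drop (k + 1) := List.drop_eq_getElem_cons hklt
      have hget : PySem.List.pyGetD s (k : Int) ' ' = s[k] := by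
        simp [PySem.List.pyGetD_natCast, List.getD_eq_getElem?_getD, hklt]
      have hcast : ((k : Int) + 1) = ((k + 1 : Nat) : Int) := by push_cast; ring
      rw [hcons, List.foldl_cons]
      rcases Nat.eq_zero_or_pos m with hm0 | hmpos
      · -- k is the last index: the loop ends here, the inner flush fires
        have hlast : ((k : Int) = (s.length : Int) - 1) := by omega
        have hnil : PySem.List.pyRange ((k : Int) + 1) (s.length : Int) 1 = [] :=
          PySem.List.pyRange_one_eq_nil (by omega)
        have hdrop1 : s.drop (k + 1) = [] := List.drop_eq_nil_of_le (by omega)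
        rw [hnil, List.foldl_nil, hdrop, hdrop1]
        simp only [pvBody, hget]
        by_cases hc : s[k] = '#'
        · simp [hc, hlast, pvExtend, show ((n : Int) + 1) ≠ 0 by omega]
        · by_cases hn : n = 0
          · simp [hc, hn, pvExtend, hlast]
          · simp [hc, hn, pvExtend, hlast]
      · -- k is not the last index: the inner flush test is false
        have hnotlast : ¬ ((k : Int) = (s.length : Int) - 1) := by omega
        by_cases hc : s[k] = '#'
        · have hstep : pvBody s (s.length : Int) ((n : Int), acc) (k : Int)
              = (((n + 1 : Nat) : Int), acc) := by
            simp [pvBody, hget, hc, hnotlast]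
          rw [hstep, hcast, ih (k + 1) (by omega) hmpos (n + 1) acc, hdrop]
          simp [pvExtend, hc]
        · by_cases hn : n = 0
          · have hstep : pvBody s (s.length : Int) ((n : Int), acc) (k : Int)
                = (((0 : Nat) : Int), acc) := by
              simp [pvBody, hget, hc, hn, hnotlast]
            rw [hstep, hcast, ih (k + 1) (by omega) hmpos 0 acc, hdrop]
            simp [pvExtend, hc, hn]
          · have hstep : pvBody s (s.length : Int) ((n : Int), acc) (k : Int)
                = (((0 : Nat) : Int), acc ++ [(n : Int)]) := by
              simp [pvBody, hget, hc, hn, hnotlast]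
            rw [hstep, hcast, ih (k + 1) (by omega) hmpos 0 (acc ++ [(n : Int)]), hdrop]
            simp [pvExtend, hc, hn]

-- ===== VERDICT (by name: the statement is the Claim_ definition above) =====
theorem check_spec : Claim_equal_check := by
  intro arrangement numbers _
  unfold Spec_check check check_alt
  have hB := pv_go_extend arrangement.toList [] []
  by_cases hs : arrangement.toList = []
  · simp [hs, PySem.Str.len_eq, PySem.Chars.split₀, PySem.Chars.split₀.go,
      PySem.List.pyRange_one_eq_nil]
  · have hpos : 0 < arrangement.toList.length := List.length_pos_of_ne_nil hs
    have hA := pv_loop_extend arrangement.toList arrangement.toList.length 0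
      (by omega) hpos 0 []
    simp only [Nat.cast_zero] at hA
    simp only [List.reverse_nil, List.map_nil, List.nil_append, List.length_nil,
      List.drop_zero] at hB hA
    simp only [PySem.Str.len_eq, PySem.Chars.split₀, hA, hB]
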